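-- pv_equiv track=rewrite | github.com/spbupos/sudoku-solver | solver.py | fail_in_col
-- ===== SOURCE A (Python) =====
-- def fail_in_col(col, sudoku):
--     c = []
--     for r in range(9):
--         if sudoku[r][col] == 0:
--             continue
--         if not sudoku[r][col] in c:
--             c.append(sudoku[r][col])
--         else:
--             return True
--     return False
-- ===== SOURCE B (Python) =====
-- def fail_in_col(col, sudoku):
--     return any(sudoku[r][col] == sudoku[p][col] != 0
--                for r in range(9) for p in range(r))
-- ===== Notes on version B (the rewrite author's own statement) =====
-- stated objective: simpler
-- what changed: A maintains a seen-values list with per-element membership tests and an early return; B is a single stateless any() over index pairs p < r testing whether some row repeats an earlier nonzero value in the column.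
import Mathlib
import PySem

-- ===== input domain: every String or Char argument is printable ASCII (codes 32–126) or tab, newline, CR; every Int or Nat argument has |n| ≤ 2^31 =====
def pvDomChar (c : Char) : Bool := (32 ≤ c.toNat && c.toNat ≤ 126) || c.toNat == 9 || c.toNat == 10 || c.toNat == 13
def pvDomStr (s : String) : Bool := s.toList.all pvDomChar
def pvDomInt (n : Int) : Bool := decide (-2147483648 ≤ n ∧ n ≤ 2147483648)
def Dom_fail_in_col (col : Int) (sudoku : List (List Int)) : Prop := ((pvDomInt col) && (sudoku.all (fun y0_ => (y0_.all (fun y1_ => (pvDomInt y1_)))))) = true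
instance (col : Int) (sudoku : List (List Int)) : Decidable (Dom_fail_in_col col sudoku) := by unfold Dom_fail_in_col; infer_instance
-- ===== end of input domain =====

-- B replaces A's stateful scan (seen-values list, membership test, early return) by a
-- single stateless any() over index pairs p < r; objective: simpler.
-- shared cell accessor sudoku[r][col] (exact: pyGet? = Python indexing, none = IndexError)
def pvCell (col : Int) (sudoku : List (List Int)) (r : Int) : Option Int :=
  (PySem.List.pyGet? sudoku r).bind (fun row => PySem.List.pyGet? row col)

-- ===== PORT A =====
-- the 'for r in range(9)' loop with accumulator c and early 'return True';
-- the 'none' (IndexError) branch is excluded by Pre_fail_in_col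
def pvScanA (col : Int) (sudoku : List (List Int)) : List Int → List Int → Bool
  | [], _ => false
  | r :: rs, c =>
    match pvCell col sudoku r with
    | none => false
    | some v =>
      if v = 0 then pvScanA col sudoku rs c
      else if ¬ (v ∈ c) then pvScanA col sudoku rs (c ++ [v])
      else true

def fail_in_col (col : Int) (sudoku : List (List Int)) : Bool :=
  pvScanA col sudoku (PySem.List.pyRange 0 9 1) []

-- ===== PORT B =====
-- sudoku[r][col] == sudoku[p][col] != 0  (the unreadable-cell case is outside Pre_)
def pvPairHit (col : Int) (sudoku : List (List Int)) (r p : Int) : Bool :=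
  match pvCell col sudoku r, pvCell col sudoku p with
  | some a, some b => a == b && b != 0
  | _, _ => false

-- any(... for r in range(9) for p in range(r))
def fail_in_col_alt (col : Int) (sudoku : List (List Int)) : Bool :=
  (PySem.List.pyRange 0 9 1).any (fun r =>
    (PySem.List.pyRange 0 r 1).any (fun p => pvPairHit col sudoku r p))

-- ===== PRECONDITION & SPEC =====
-- Exactly the inputs on which Python A returns (no IndexError): either the first nine
-- rows are all indexable at col, or some row r repeats an earlier nonzero column value
-- with rows 0..r indexable (A returns True there before reaching any bad row).
def Pre_fail_in_col (col : Int) (sudoku : List (List Int)) : Prop :=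
  (∀ r ∈ PySem.List.pyRange 0 9 1, (pvCell col sudoku r).isSome = true) ∨
  (∃ r ∈ PySem.List.pyRange 0 9 1, ∃ p ∈ PySem.List.pyRange 0 r 1,
     (∀ q ∈ PySem.List.pyRange 0 (r + 1) 1, (pvCell col sudoku q).isSome = true) ∧
     pvCell col sudoku r = pvCell col sudoku p ∧ pvCell col sudoku r ≠ some 0)
instance (col : Int) (sudoku : List (List Int)) : Decidable (Pre_fail_in_col col sudoku) := by
  unfold Pre_fail_in_col; infer_instance

def pvWitness_fail_in_col : Int × List (List Int) :=
  (0, [[1],[0],[2],[0],[3],[0],[0],[0],[1]])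

def Spec_fail_in_col (col : Int) (sudoku : List (List Int)) (out : Bool) : Prop := out = fail_in_col_alt col sudoku
instance (col : Int) (sudoku : List (List Int)) (out : Bool) : Decidable (Spec_fail_in_col col sudoku out) := by unfold Spec_fail_in_col; infer_instance

-- ===== CLAIM (what is proved, stated in full; the proofs are below) =====
def Claim_equal_fail_in_col : Prop := ∀ (col : Int) (sudoku : List (List Int)), Dom_fail_in_col col sudoku → Pre_fail_in_col col sudoku → Spec_fail_in_col col sudoku (fail_in_col col sudoku)

-- ===== LEMMAS AND PROOFS =====

-- the nonzero column values of the rows listed in l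
def pvNZ (col : Int) (sudoku : List (List Int)) (l : List Int) : List Int :=
  (l.filterMap (pvCell col sudoku)).filter (fun v => v != 0)

-- A's early-return scan: duplicate-freedom of the accumulator extended by the nonzero
-- values of the readable prefix of the remaining rows (no readability hypothesis).
theorem pvScanA_eq (col : Int) (sudoku : List (List Int)) :
    ∀ (rs : List Int) (c : List Int), c.Nodup →
      pvScanA col sudoku rs c =
        !decide ((c ++ pvNZ col sudoku
          (rs.takeWhile (fun r => (pvCell col sudoku r).isSome))).Nodup) := by
  intro rs
  induction rs with
  | nil => intro c hc; simp [pvScanA, pvNZ, hc]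
  | cons r rs ih =>
    intro c hc
    cases hcell : pvCell col sudoku r with
    | none =>
      rw [List.takeWhile_cons_of_neg (by simp [hcell])]
      simp [pvScanA, hcell, pvNZ, hc]
    | some v =>
      rw [List.takeWhile_cons_of_pos (by simp [hcell])]
      simp only [pvScanA, hcell]
      by_cases h0 : v = 0
      · subst h0
        rw [if_pos rfl, ih c hc]
        simp [pvNZ, hcell]
      · rw [if_neg h0]
        have hfc : pvNZ col sudoku (r :: rs.takeWhile (fun q => (pvCell col sudoku q).isSome))
            = v :: pvNZ col sudoku (rs.takeWhile (fun q => (pvCell col sudoku q).isSome)) := by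
          simp [pvNZ, hcell, h0]
        rw [hfc]
        by_cases hmem : v ∈ c
        · rw [if_neg (not_not_intro hmem)]
          have hnd : ¬ (c ++ v :: pvNZ col sudoku
              (rs.takeWhile (fun q => (pvCell col sudoku q).isSome))).Nodup := by
            intro h
            rcases List.nodup_append.mp h with ⟨-, -, hdisj⟩
            exact hdisj v hmem v (by simp) rfl
          simp [hnd]
        · rw [if_pos hmem]
          have hc' : (c ++ [v]).Nodup := by
            simp only [List.nodup_append]
            refine ⟨hc, List.nodup_singleton v, ?_⟩
            intro a ha b hb hab
            simp only [List.mem_singleton] at hb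
            exact hmem (hb ▸ hab ▸ ha)
          rw [ih (c ++ [v]) hc']
          simp [List.append_assoc]

-- B's pairwise any() on a fully readable grid: a duplicate pair exists among the first n
-- rows iff the nonzero values of those rows are not duplicate-free.
theorem pvPairs_iff (col : Int) (sudoku : List (List Int))
    (hall : ∀ r ∈ PySem.List.pyRange 0 9 1, (pvCell col sudoku r).isSome = true) :
    ∀ (n : Nat), n ≤ 9 →
      (((PySem.List.pyRange 0 (n : Int) 1).any (fun r =>
          (PySem.List.pyRange 0 r 1).any (fun p => pvPairHit col sudoku r p))) = true
        ↔ ¬ (pvNZ col sudoku (PySem.List.pyRange 0 (n : Int) 1)).Nodup) := by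
  intro n
  induction n with
  | zero =>
    intro _
    have h0 : PySem.List.pyRange 0 ((0 : Nat) : Int) 1 = [] := by norm_num [PySem.List.pyRange_zero]
    rw [h0]
    simp [pvNZ]
  | succ n ih =>
    intro hn9
    have hsplit : PySem.List.pyRange 0 ((n + 1 : Nat) : Int) 1
        = PySem.List.pyRange 0 (n : Int) 1 ++ [(n : Int)] := by
      push_cast
      exact PySem.List.pyRange_one_succ_right (by positivity)
    have hnmem : (n : Int) ∈ PySem.List.pyRange 0 9 1 :=
      PySem.List.mem_pyRange_one.mpr ⟨by positivity, by exact_mod_cast Nat.lt_of_succ_le hn9⟩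
    obtain ⟨vn, hvn⟩ := Option.isSome_iff_exists.mp (hall _ hnmem)
    have hreadp : ∀ p ∈ PySem.List.pyRange 0 (n : Int) 1, (pvCell col sudoku p).isSome = true := by
      intro p hp
      rw [PySem.List.mem_pyRange_one] at hp
      refine hall p (PySem.List.mem_pyRange_one.mpr ⟨hp.1, lt_of_lt_of_le hp.2 ?_⟩)
      exact_mod_cast Nat.le_of_succ_le hn9
    rw [hsplit, List.any_append, List.any_cons, List.any_nil]
    have hNZsplit : pvNZ col sudoku (PySem.List.pyRange 0 (n : Int) 1 ++ [(n : Int)])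
        = pvNZ col sudoku (PySem.List.pyRange 0 (n : Int) 1)
          ++ pvNZ col sudoku [(n : Int)] := by
      simp [pvNZ, List.filterMap_append]
    rw [hNZsplit]
    by_cases h0 : vn = 0
    · have hinner : ((PySem.List.pyRange 0 (n : Int) 1).any
          (fun p => pvPairHit col sudoku (n : Int) p)) = false := by
        apply List.any_eq_false.mpr
        intro p _
        unfold pvPairHit
        rw [hvn, h0]
        cases hcp : pvCell col sudoku p with
        | none => simp
        | some b => simp; omega
      have hNZn : pvNZ col sudoku [(n : Int)] = [] := by
        simp [pvNZ, hvn, h0]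
      rw [hinner, hNZn, List.append_nil]
      simpa using ih (Nat.le_of_succ_le hn9)
    · have hNZn : pvNZ col sudoku [(n : Int)] = [vn] := by
        simp [pvNZ, hvn, h0]
      rw [hNZn]
      have hinner : ((PySem.List.pyRange 0 (n : Int) 1).any
          (fun p => pvPairHit col sudoku (n : Int) p)) = true
          ↔ vn ∈ pvNZ col sudoku (PySem.List.pyRange 0 (n : Int) 1) := by
        rw [List.any_eq_true]
        constructor
        · rintro ⟨p, hp, hhit⟩
          obtain ⟨vp, hvp⟩ := Option.isSome_iff_exists.mp (hreadp p hp)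
          unfold pvPairHit at hhit
          rw [hvn, hvp] at hhit
          simp only [Bool.and_eq_true, beq_iff_eq, bne_iff_ne] at hhit
          obtain ⟨hvpv, -⟩ := hhit
          simp only [pvNZ, List.mem_filter, List.mem_filterMap]
          exact ⟨⟨p, hp, by rw [hvp, hvpv]⟩, by simp [h0]⟩
        · intro hv
          simp only [pvNZ, List.mem_filter, List.mem_filterMap] at hv
          obtain ⟨⟨p, hp, hvp⟩, -⟩ := hv
          refine ⟨p, hp, ?_⟩
          unfold pvPairHit
          rw [hvn, hvp]
          simp [h0]
      have hRHS : ¬ (pvNZ col sudoku (PySem.List.pyRange 0 (n : Int) 1) ++ [vn]).Nodup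
          ↔ (¬ (pvNZ col sudoku (PySem.List.pyRange 0 (n : Int) 1)).Nodup
             ∨ vn ∈ pvNZ col sudoku (PySem.List.pyRange 0 (n : Int) 1)) := by
        constructor
        · intro h
          by_cases hnd : (pvNZ col sudoku (PySem.List.pyRange 0 (n : Int) 1)).Nodup
          · right
            by_contra hv
            refine h (List.nodup_append.mpr ⟨hnd, List.nodup_singleton _, ?_⟩)
            intro a ha b hb hab
            simp only [List.mem_singleton] at hb
            exact hv (hb ▸ hab ▸ ha)
          · exact Or.inl hnd
        · rintro (h | h) hnd
          · exact h (List.nodup_append.mp hnd).1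
          · rcases List.nodup_append.mp hnd with ⟨-, -, hd⟩
            exact hd vn h vn (by simp) rfl
      rw [hRHS]
      simp only [Bool.or_eq_true, ih (Nat.le_of_succ_le hn9), hinner, Bool.or_false]
-- a function hitting the same value on two distinct members yields a duplicate
theorem pv_two_le_count_filterMap (f : Int → Option Int) (l : List Int) (a p r : Int)
    (hp : p ∈ l) (hr : r ∈ l) (hne : p ≠ r) (h1 : f p = some a) (h2 : f r = some a) :
    2 ≤ (l.filterMap f).count a := by
  have hperm := (List.perm_cons_erase hp).filterMap f
  rw [hperm.count_eq]
  rw [List.filterMap_cons, h1]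
  have hr' : r ∈ l.erase p := (List.mem_erase_of_ne (Ne.symm hne)).mpr hr
  have hmem : a ∈ (l.erase p).filterMap f := List.mem_filterMap.mpr ⟨r, hr', h2⟩
  have hpos := List.count_pos_iff.mpr hmem
  simp only [List.count_cons_self]
  omega

-- ===== VERDICT (by name: the statement is the Claim_ definition above) =====
theorem fail_in_col_spec : Claim_equal_fail_in_col := by
  intro col sudoku _ hpre
  unfold Spec_fail_in_col fail_in_col fail_in_col_alt
  rw [pvScanA_eq col sudoku _ [] List.nodup_nil]
  simp only [List.nil_append]
  rcases hpre with hall | ⟨r, hr9, p, hpr, hread, heq, hne0⟩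
  · have htw : (PySem.List.pyRange 0 9 1).takeWhile (fun r => (pvCell col sudoku r).isSome)
        = PySem.List.pyRange 0 9 1 := List.takeWhile_eq_self_iff.mpr hall
    rw [htw]
    have h9 := pvPairs_iff col sudoku hall 9 le_rfl
    simp only [Nat.cast_ofNat] at h9
    rw [Bool.eq_iff_iff]
    simp only [Bool.not_eq_true', decide_eq_false_iff_not]
    exact h9.symm
  · -- a duplicate pair with readable prefix: both sides are true
    obtain ⟨a, ha⟩ := Option.isSome_iff_exists.mp
      (hread r (PySem.List.mem_pyRange_one.mpr
        ⟨(PySem.List.mem_pyRange_one.mp hr9).1, by linarith [(PySem.List.mem_pyRange_one.mp hr9).1]⟩))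
    have hpa : pvCell col sudoku p = some a := by rw [← heq, ha]
    have ha0 : a ≠ 0 := fun h => hne0 (by rw [ha, h])
    have hBtrue : ((PySem.List.pyRange 0 9 1).any (fun r =>
        (PySem.List.pyRange 0 r 1).any (fun p => pvPairHit col sudoku r p))) = true := by
      refine List.any_eq_true.mpr ⟨r, hr9, List.any_eq_true.mpr ⟨p, hpr, ?_⟩⟩
      unfold pvPairHit
      rw [ha, hpa]
      simp [ha0]
    rw [hBtrue]
    have hp1 : p ∈ PySem.List.pyRange 0 (r + 1) 1 := by
      rw [PySem.List.mem_pyRange_one] at hpr ⊢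
      omega
    have hr1 : r ∈ PySem.List.pyRange 0 (r + 1) 1 := by
      rw [PySem.List.mem_pyRange_one] at hr9 ⊢
      omega
    have hsplit9 : PySem.List.pyRange 0 9 1
        = PySem.List.pyRange 0 (r + 1) 1 ++ PySem.List.pyRange (r + 1) 9 1 := by
      refine PySem.List.pyRange_one_append 0 (r + 1) 9 ?_ ?_
      · have := (PySem.List.mem_pyRange_one.mp hr9).1; omega
      · have := (PySem.List.mem_pyRange_one.mp hr9).2; omega
    have htw1 : (PySem.List.pyRange 0 (r + 1) 1).takeWhile
        (fun q => (pvCell col sudoku q).isSome) = PySem.List.pyRange 0 (r + 1) 1 :=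
      List.takeWhile_eq_self_iff.mpr hread
    have htw : (PySem.List.pyRange 0 9 1).takeWhile (fun q => (pvCell col sudoku q).isSome)
        = PySem.List.pyRange 0 (r + 1) 1
          ++ (PySem.List.pyRange (r + 1) 9 1).takeWhile (fun q => (pvCell col sudoku q).isSome) := by
      rw [hsplit9, List.takeWhile_append, htw1, if_pos rfl]
    rw [htw]
    have hcnt : 2 ≤ (pvNZ col sudoku (PySem.List.pyRange 0 (r + 1) 1)).count a := by
      have hne : p ≠ r := fun h => by
        have := (PySem.List.mem_pyRange_one.mp hpr).2; omega
      have h2 := pv_two_le_count_filterMap (pvCell col sudoku)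
        (PySem.List.pyRange 0 (r + 1) 1) a p r hp1 hr1 hne hpa ha
      have := List.count_filter (p := fun v => v != 0) (a := a)
        (l := (PySem.List.pyRange 0 (r + 1) 1).filterMap (pvCell col sudoku)) (by simp [ha0])
      unfold pvNZ
      omega
    have hnotnodup : ¬ (pvNZ col sudoku (PySem.List.pyRange 0 (r + 1) 1
        ++ (PySem.List.pyRange (r + 1) 9 1).takeWhile
          (fun q => (pvCell col sudoku q).isSome))).Nodup := by
      intro hnd
      have hle := List.nodup_iff_count_le_one.mp hnd a
      have : pvNZ col sudoku (PySem.List.pyRange 0 (r + 1) 1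
          ++ (PySem.List.pyRange (r + 1) 9 1).takeWhile
            (fun q => (pvCell col sudoku q).isSome))
          = pvNZ col sudoku (PySem.List.pyRange 0 (r + 1) 1)
            ++ pvNZ col sudoku ((PySem.List.pyRange (r + 1) 9 1).takeWhile
              (fun q => (pvCell col sudoku q).isSome)) := by
        simp [pvNZ, List.filterMap_append]
      rw [this, List.count_append] at hle
      omega
    simp [hnotnodup]
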